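-- pv_equiv track=rewrite | github.com/wakkawarpman-oss/hanna-v3-2-clean | src/cli.py | _infer_nuclei_profile
-- ===== SOURCE A (Python) =====
-- def _infer_nuclei_profile(module_tokens: list[str]) -> str | None:
--     deep_presets = {"pd-full", "pd-infra-deep", "infra-deep", "recon-auto-deep", "full-spectrum-2026", "full-spectrum"}
--     quick_presets = {"pd-infra", "pd-infra-quick", "recon-auto", "recon-auto-quick"}
--     if any(token in deep_presets for token in module_tokens):
--         return "deep"
--     if any(token in quick_presets for token in module_tokens):
--         return "quick"
--     return None
-- ===== SOURCE B (Python) =====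
-- _PROFILE_BY_PRESET = {
--     "pd-full": "deep",
--     "pd-infra-deep": "deep",
--     "infra-deep": "deep",
--     "recon-auto-deep": "deep",
--     "full-spectrum-2026": "deep",
--     "full-spectrum": "deep",
--     "pd-infra": "quick",
--     "pd-infra-quick": "quick",
--     "recon-auto": "quick",
--     "recon-auto-quick": "quick",
-- }
--
--
-- def _infer_nuclei_profile(module_tokens: list[str]) -> str | None:
--     # Single pass: "deep" wins immediately; remember whether a quick preset was seen.
--     found_quick = False
--     for token in module_tokens:
--         profile = _PROFILE_BY_PRESET.get(token)
--         if profile == "deep":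
--             return "deep"
--         if profile == "quick":
--             found_quick = True
--     return "quick" if found_quick else None
-- ===== Notes on version B (the rewrite author's own statement) =====
-- stated objective: alternative
-- what changed: Replaces two any() scans over two preset sets by one single pass over module_tokens with a found_quick flag and a single token->profile dict, returning 'deep' immediately on a hit.
import Mathlib
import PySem

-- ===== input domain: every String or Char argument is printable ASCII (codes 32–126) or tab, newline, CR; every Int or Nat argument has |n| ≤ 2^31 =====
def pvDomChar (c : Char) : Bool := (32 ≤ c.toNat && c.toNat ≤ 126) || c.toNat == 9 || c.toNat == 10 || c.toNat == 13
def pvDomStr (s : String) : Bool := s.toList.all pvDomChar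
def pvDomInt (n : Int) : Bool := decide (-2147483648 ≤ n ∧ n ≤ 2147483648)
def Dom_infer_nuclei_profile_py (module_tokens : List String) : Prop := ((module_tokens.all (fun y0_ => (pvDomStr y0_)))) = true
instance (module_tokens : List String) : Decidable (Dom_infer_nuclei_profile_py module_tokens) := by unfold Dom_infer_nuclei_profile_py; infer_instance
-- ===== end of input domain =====

-- B replaces A's two any()-scans over two preset sets by one single pass with a
-- found_quick flag and a single token->profile dict (objective: alternative).

-- ===== PORT A =====
def pvDeepPresets : PySem.Set String := PySem.Set.ofList
  ["pd-full", "pd-infra-deep", "infra-deep", "recon-auto-deep", "full-spectrum-2026", "full-spectrum"]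
def pvQuickPresets : PySem.Set String := PySem.Set.ofList
  ["pd-infra", "pd-infra-quick", "recon-auto", "recon-auto-quick"]

def infer_nuclei_profile_py (module_tokens : List String) : Option String :=
  if module_tokens.any (fun token => pvDeepPresets.contains token) then some "deep"
  else if module_tokens.any (fun token => pvQuickPresets.contains token) then some "quick"
  else none

-- ===== PORT B =====
def pvProfileByPreset : PySem.Dict String String := PySem.Dict.ofList
  [("pd-full","deep"),("pd-infra-deep","deep"),("infra-deep","deep"),
   ("recon-auto-deep","deep"),("full-spectrum-2026","deep"),("full-spectrum","deep"),
   ("pd-infra","quick"),("pd-infra-quick","quick"),("recon-auto","quick"),("recon-auto-quick","quick")]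

-- the 'for token in module_tokens' loop of Source B, with its found_quick flag
def pvAltLoop : List String → Bool → Option String
  | [], foundQuick => if foundQuick then some "quick" else none
  | token :: rest, foundQuick =>
    match pvProfileByPreset.get? token with
    | some "deep" => some "deep"
    | some "quick" => pvAltLoop rest true
    | _ => pvAltLoop rest foundQuick

def infer_nuclei_profile_py_alt (module_tokens : List String) : Option String :=
  pvAltLoop module_tokens false

-- ===== PRECONDITION & SPEC =====
def Spec_infer_nuclei_profile_py (module_tokens : List String) (out : Option String) : Prop := out = infer_nuclei_profile_py_alt module_tokens
instance (module_tokens : List String) (out : Option String) : Decidable (Spec_infer_nuclei_profile_py module_tokens out) := by unfold Spec_infer_nuclei_profile_py; infer_instance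

-- ===== CLAIM (what is proved, stated in full; the proofs are below) =====
def Claim_equal_infer_nuclei_profile_py : Prop := ∀ (module_tokens : List String), Dom_infer_nuclei_profile_py module_tokens → Spec_infer_nuclei_profile_py module_tokens (infer_nuclei_profile_py module_tokens)

-- ===== LEMMAS AND PROOFS =====
lemma pvItems : pvProfileByPreset.items =
  [("pd-full","deep"),("pd-infra-deep","deep"),("infra-deep","deep"),
   ("recon-auto-deep","deep"),("full-spectrum-2026","deep"),("full-spectrum","deep"),
   ("pd-infra","quick"),("pd-infra-quick","quick"),("recon-auto","quick"),("recon-auto-quick","quick")] := by decide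

-- B's dict lookup agrees with A's two set-membership tests, token by token.
lemma get?_profile (t : String) :
    pvProfileByPreset.get? t =
      if pvDeepPresets.contains t then some "deep"
      else if pvQuickPresets.contains t then some "quick" else none := by
  by_cases h1 : t = "pd-full" <;> by_cases h2 : t = "pd-infra-deep" <;>
  by_cases h3 : t = "infra-deep" <;> by_cases h4 : t = "recon-auto-deep" <;>
  by_cases h5 : t = "full-spectrum-2026" <;> by_cases h6 : t = "full-spectrum" <;>
  by_cases h7 : t = "pd-infra" <;> by_cases h8 : t = "pd-infra-quick" <;>
  by_cases h9 : t = "recon-auto" <;> by_cases h10 : t = "recon-auto-quick" <;>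
  first
    | (subst_vars; decide)
    | (simp [PySem.Dict.get?, pvItems, pvDeepPresets, pvQuickPresets, PySem.Set.contains,
        PySem.Set.ofList, List.find?, h1, h2, h3, h4, h5, h6, h7, h8, h9, h10,
        show ("pd-full" == t) = false by simp [Ne.symm h1], show ("pd-infra-deep" == t) = false by simp [Ne.symm h2], show ("infra-deep" == t) = false by simp [Ne.symm h3], show ("recon-auto-deep" == t) = false by simp [Ne.symm h4], show ("full-spectrum-2026" == t) = false by simp [Ne.symm h5], show ("full-spectrum" == t) = false by simp [Ne.symm h6], show ("pd-infra" == t) = false by simp [Ne.symm h7], show ("pd-infra-quick" == t) = false by simp [Ne.symm h8], show ("recon-auto" == t) = false by simp [Ne.symm h9], show ("recon-auto-quick" == t) = false by simp [Ne.symm h10]])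

-- loop invariant: pvAltLoop with flag fq computes A's if-chain, 'quick' pre-seeded by fq
lemma pvAltLoop_eq (xs : List String) (fq : Bool) :
    pvAltLoop xs fq =
      if xs.any (fun token => pvDeepPresets.contains token) then some "deep"
      else if fq || xs.any (fun token => pvQuickPresets.contains token) then some "quick"
      else none := by
  induction xs generalizing fq with
  | nil => simp [pvAltLoop]
  | cons t rest ih =>
    simp only [pvAltLoop, get?_profile t, List.any_cons]
    by_cases hd : t ∈ pvDeepPresets <;>
      by_cases hq : t ∈ pvQuickPresets <;>
      simp [hd, hq, ih]

-- ===== VERDICT (by name: the statement is the Claim_ definition above) =====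
theorem infer_nuclei_profile_py_spec : Claim_equal_infer_nuclei_profile_py := by
  intro xs _
  unfold Spec_infer_nuclei_profile_py infer_nuclei_profile_py infer_nuclei_profile_py_alt
  rw [pvAltLoop_eq]
  simp
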